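-- pv_equiv track=rewrite | github.com/kmrasmussen/chatbot.py | codeblocks.py | add_code_copy_tag_to_response_text
-- ===== SOURCE A (Python) =====
-- def add_code_copy_tag_to_response_text(response_text, code_blocks_start_index=0):
--     code_blocks = []
--     code_block_start = False
--     code_block = ''
--     response_text_with_copy_tags = ''
--     for line in response_text.split('\n'):
--         if line.strip().startswith('```'):
--             if code_block_start:
--                 code_blocks.append(code_block.strip())
--                 response_text_with_copy_tags += line + f'(cp {code_blocks_start_index + len(code_blocks) - 1})\n'
--                 code_block = ''
--                 code_block_start = False
--             else:
--                 code_block_start = True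
--                 response_text_with_copy_tags += line + f'(cp {code_blocks_start_index + len(code_blocks)})\n'
--         else:
--             if code_block_start:
--                 code_block += line + '\n'
--             response_text_with_copy_tags += line + '\n'
--     return response_text_with_copy_tags, code_blocks
-- ===== SOURCE B (Python) =====
-- def _next_fence(lines):
--     for i, line in enumerate(lines):
--         if line.strip().startswith('```'):
--             return i
--     return None
--
--
-- def add_code_copy_tag_to_response_text(response_text, code_blocks_start_index=0):
--     out_parts = []
--     blocks = []
--     rest = response_text.split('\n')
--     k = 0
--     while True:
--         i = _next_fence(rest)
--         if i is None:
--             out_parts.extend(l + '\n' for l in rest)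
--             break
--         out_parts.extend(l + '\n' for l in rest[:i])
--         tag = '(cp %d)\n' % (code_blocks_start_index + k)
--         out_parts.append(rest[i] + tag)
--         rest = rest[i + 1:]
--         j = _next_fence(rest)
--         if j is None:
--             out_parts.extend(l + '\n' for l in rest)
--             break
--         inner = rest[:j]
--         out_parts.extend(l + '\n' for l in inner)
--         out_parts.append(rest[j] + tag)
--         blocks.append('\n'.join(inner).strip())
--         rest = rest[j + 1:]
--         k += 1
--     return ''.join(out_parts), blocks
-- ===== Notes on version B (the rewrite author's own statement) =====
-- stated objective: alternative
-- what changed: A's single pass with a boolean open/closed toggle, a growing code_block accumulator string and len(code_blocks) as the tag counter is replaced by a segment-splitting loop: a helper finds the next fence line, the text is consumed in (plain segment, opening fence, inner segment, closing fence) chunks, each complete fence pair shares one precomputed tag, and each block is built by newline-joining and stripping the slice between the paired fences.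
import Mathlib
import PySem

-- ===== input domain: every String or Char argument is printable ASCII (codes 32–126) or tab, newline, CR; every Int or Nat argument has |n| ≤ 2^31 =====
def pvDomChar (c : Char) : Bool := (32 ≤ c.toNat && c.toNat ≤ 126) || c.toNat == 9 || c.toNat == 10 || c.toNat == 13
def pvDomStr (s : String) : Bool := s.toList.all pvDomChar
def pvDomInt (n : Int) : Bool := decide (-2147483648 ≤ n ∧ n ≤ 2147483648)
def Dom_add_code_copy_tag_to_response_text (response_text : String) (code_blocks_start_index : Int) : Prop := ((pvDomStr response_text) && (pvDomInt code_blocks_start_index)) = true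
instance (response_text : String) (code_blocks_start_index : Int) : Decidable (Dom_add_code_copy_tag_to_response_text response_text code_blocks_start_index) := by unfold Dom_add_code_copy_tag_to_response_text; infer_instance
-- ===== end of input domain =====

-- B replaces A's boolean-toggle single pass by a segment-splitting loop that pairs
-- each opening fence with its closing fence explicitly (objective: alternative).

-- line.strip().startswith('```')  (used by both versions)
def pvIsFence (line : String) : Bool :=
  PySem.Str.startswith (PySem.Str.strip line) "```"

-- ===== PORT A =====
-- one iteration of A's for-loop; state = (code_blocks, code_block_start, code_block, response_text_with_copy_tags)
def aStep (code_blocks_start_index : Int)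
    (st : List String × Bool × String × String) (line : String) :
    List String × Bool × String × String :=
  let (code_blocks, code_block_start, code_block, acc) := st
  if pvIsFence line then
    if code_block_start then
      let code_blocks' := code_blocks ++ [PySem.Str.strip code_block]
      (code_blocks', false, "",
        acc ++ line ++ "(cp " ++ PySem.Int.toStr (code_blocks_start_index + (code_blocks'.length : Int) - 1) ++ ")\n")
    else
      (code_blocks, true, code_block,
        acc ++ line ++ "(cp " ++ PySem.Int.toStr (code_blocks_start_index + (code_blocks.length : Int)) ++ ")\n")
  else
    if code_block_start then
      (code_blocks, code_block_start, code_block ++ line ++ "\n", acc ++ line ++ "\n")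
    else
      (code_blocks, code_block_start, code_block, acc ++ line ++ "\n")

def add_code_copy_tag_to_response_text (response_text : String) (code_blocks_start_index : Int) : String × List String :=
  -- response_text.split('\n'); the separator is non-empty so split? always returns some
  let lines := (PySem.Str.split? response_text "\n").getD []
  let final := lines.foldl (aStep code_blocks_start_index) ([], false, "", "")
  (final.2.2.2, final.1)

-- ===== PORT B =====
-- _next_fence as a splitter: (lines before the first fence, the fence line, lines after), none if no fence
def splitAtFence : List String → Option (List String × String × List String)
  | [] => none
  | l :: ls =>
    if pvIsFence l then some ([], l, ls)
    else (splitAtFence ls).map (fun p => (l :: p.1, p.2.1, p.2.2))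

theorem splitAtFence_shrinks : ∀ (xs : List String) (b : List String) (f : String) (r : List String),
    splitAtFence xs = some (b, f, r) → r.length < xs.length := by
  intro xs
  induction xs with
  | nil => intro b f r h; simp [splitAtFence] at h
  | cons l ls ih =>
    intro b f r h
    by_cases hf : pvIsFence l
    · simp [splitAtFence, hf] at h
      obtain ⟨-, -, rfl⟩ := h
      simp
    · cases hs : splitAtFence ls with
      | none => simp [splitAtFence, hf, hs] at h
      | some p =>
        obtain ⟨pb, pf, pr⟩ := p
        simp [splitAtFence, hf, hs] at h
        obtain ⟨-, -, rfl⟩ := h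
        have := ih pb pf pr hs
        simp [Nat.lt_succ_of_lt this]

-- the while-loop of B: consumes `rest`, k = number of completed fence pairs so far
def bLoop (code_blocks_start_index : Int) (k : Int) (rest : List String) : List String × List String :=
  match h1 : splitAtFence rest with
  | none => (rest.map (fun l => l ++ "\n"), [])
  | some (before, openLine, rest1) =>
    let tag := "(cp " ++ PySem.Int.toStr (code_blocks_start_index + k) ++ ")\n"
    match h2 : splitAtFence rest1 with
    | none =>
      (before.map (fun l => l ++ "\n") ++ [openLine ++ tag] ++ rest1.map (fun l => l ++ "\n"), [])
    | some (inner, closeLine, rest2) =>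
      let rec_result := bLoop code_blocks_start_index (k + 1) rest2
      (before.map (fun l => l ++ "\n") ++ [openLine ++ tag] ++ inner.map (fun l => l ++ "\n")
         ++ [closeLine ++ tag] ++ rec_result.1,
       PySem.Str.strip (PySem.Str.join "\n" inner) :: rec_result.2)
termination_by rest.length
decreasing_by
  exact Nat.lt_trans (splitAtFence_shrinks rest1 inner closeLine rest2 h2)
    (splitAtFence_shrinks rest before openLine rest1 h1)

def add_code_copy_tag_to_response_text_alt (response_text : String) (code_blocks_start_index : Int) : String × List String :=
  let lines := (PySem.Str.split? response_text "\n").getD []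
  let result := bLoop code_blocks_start_index 0 lines
  (PySem.Str.join "" result.1, result.2)

-- ===== PRECONDITION & SPEC =====
def Spec_add_code_copy_tag_to_response_text (response_text : String) (code_blocks_start_index : Int) (out : String × List String) : Prop := out = add_code_copy_tag_to_response_text_alt response_text code_blocks_start_index
instance (response_text : String) (code_blocks_start_index : Int) (out : String × List String) : Decidable (Spec_add_code_copy_tag_to_response_text response_text code_blocks_start_index out) := by unfold Spec_add_code_copy_tag_to_response_text; infer_instance

-- ===== CLAIM (what is proved, stated in full; the proofs are below) =====
def Claim_equal_add_code_copy_tag_to_response_text : Prop := ∀ (response_text : String) (code_blocks_start_index : Int), Dom_add_code_copy_tag_to_response_text response_text code_blocks_start_index → Spec_add_code_copy_tag_to_response_text response_text code_blocks_start_index (add_code_copy_tag_to_response_text response_text code_blocks_start_index)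

-- ===== LEMMAS AND PROOFS =====

-- plain concatenation of a list of strings, and the emission of a line segment
def catStr : List String → String
  | [] => ""
  | x :: xs => x ++ catStr xs

def emitStr : List String → String
  | [] => ""
  | l :: ls => l ++ "\n" ++ emitStr ls

theorem join_empty_eq_catStr (parts : List String) : PySem.Str.join "" parts = catStr parts := by
  induction parts with
  | nil => simp [String.ext_iff, PySem.Str.toList_join, PySem.Chars.join_nil, catStr]
  | cons x xs ih =>
    cases xs with
    | nil => simp [String.ext_iff, PySem.Str.toList_join, PySem.Chars.join_singleton, catStr]
    | cons y ys =>
      rw [catStr, ← ih]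
      simp [String.ext_iff, PySem.Str.toList_join, PySem.Chars.join_cons_cons]

theorem catStr_append (xs ys : List String) : catStr (xs ++ ys) = catStr xs ++ catStr ys := by
  induction xs with
  | nil => simp [catStr]
  | cons x xs ih => simp [catStr, ih, String.append_assoc]

theorem catStr_map_emit (seg : List String) : catStr (seg.map (fun l => l ++ "\n")) = emitStr seg := by
  induction seg with
  | nil => simp [catStr, emitStr]
  | cons l ls ih => simp [catStr, emitStr, ih, String.append_assoc]

theorem chars_rstrip_newline (l : List Char) :
    PySem.Chars.rstrip (l ++ ['\n']) = PySem.Chars.rstrip l := by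
  simp [PySem.Chars.rstrip, List.dropWhile_cons]
  norm_num [show PySem.Chars.isspace '\n' = true from by decide]

theorem strip_append_newline (s : String) : PySem.Str.strip (s ++ "\n") = PySem.Str.strip s := by
  simp only [String.ext_iff, PySem.Str.strip, String.toList_ofList, String.toList_append]
  show PySem.Chars.strip (s.toList ++ "\n".toList) = PySem.Chars.strip s.toList
  have hnl : "\n".toList = ['\n'] := by decide
  rw [hnl]
  simp only [PySem.Chars.strip, PySem.Chars.lstrip, List.dropWhile_append]
  split
  · next h =>
    rw [List.isEmpty_iff] at h
    rw [h, show List.dropWhile PySem.Chars.isspace ['\n'] = [] from by decide]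
  · exact chars_rstrip_newline _

theorem join_nl_cons_cons (x y : String) (ys : List String) :
    PySem.Str.join "\n" (x :: y :: ys) = x ++ "\n" ++ PySem.Str.join "\n" (y :: ys) := by
  simp [String.ext_iff, PySem.Str.toList_join, PySem.Chars.join_cons_cons]

theorem emit_eq_join_nl (x : String) (xs : List String) :
    emitStr (x :: xs) = PySem.Str.join "\n" (x :: xs) ++ "\n" := by
  induction xs generalizing x with
  | nil =>
    rw [emitStr, emitStr, String.append_empty]
    congr 1
    simp [String.ext_iff, PySem.Str.toList_join, PySem.Chars.join_singleton]
  | cons y ys ih =>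
    rw [emitStr, ih y, join_nl_cons_cons]
    simp [String.append_assoc]

theorem strip_emit_eq_strip_join (inner : List String) :
    PySem.Str.strip (emitStr inner) = PySem.Str.strip (PySem.Str.join "\n" inner) := by
  cases inner with
  | nil => simp [emitStr, PySem.Str.strip, PySem.Str.toList_join, PySem.Chars.join_nil]
  | cons x xs => rw [emit_eq_join_nl, strip_append_newline]

theorem splitAtFence_none : ∀ (xs : List String), splitAtFence xs = none →
    ∀ x ∈ xs, pvIsFence x = false := by
  intro xs
  induction xs with
  | nil => simp
  | cons l ls ih =>
    intro h
    by_cases hf : pvIsFence l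
    · simp [splitAtFence, hf] at h
    · cases hs : splitAtFence ls with
      | none =>
        intro x hx
        rcases List.mem_cons.mp hx with rfl | hx
        · simpa using hf
        · exact ih hs x hx
      | some p => simp [splitAtFence, hf, hs] at h

theorem splitAtFence_some : ∀ (xs b : List String) (f : String) (r : List String),
    splitAtFence xs = some (b, f, r) →
    xs = b ++ f :: r ∧ pvIsFence f = true ∧ ∀ x ∈ b, pvIsFence x = false := by
  intro xs
  induction xs with
  | nil => intro b f r h; simp [splitAtFence] at h
  | cons l ls ih =>
    intro b f r h
    by_cases hf : pvIsFence l
    · simp [splitAtFence, hf] at h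
      obtain ⟨rfl, rfl, rfl⟩ := h
      simpa using hf
    · cases hs : splitAtFence ls with
      | none => simp [splitAtFence, hf, hs] at h
      | some p =>
        obtain ⟨pb, pf, pr⟩ := p
        simp [splitAtFence, hf, hs] at h
        obtain ⟨rfl, rfl, rfl⟩ := h
        obtain ⟨he, hff, hnb⟩ := ih pb pf pr hs
        refine ⟨by simp [he], hff, ?_⟩
        intro x hx
        rcases List.mem_cons.mp hx with rfl | hx
        · simpa using hf
        · exact hnb x hx

theorem bLoop_eq_none (si k : Int) (rest : List String) (h : splitAtFence rest = none) :
    bLoop si k rest = (rest.map (fun l => l ++ "\n"), []) := by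
  rw [bLoop]
  split
  · rfl
  · next b f r hs => rw [h] at hs; cases hs

theorem bLoop_eq_open (si k : Int) (rest before : List String) (openLine : String) (rest1 : List String)
    (h1 : splitAtFence rest = some (before, openLine, rest1)) (h2 : splitAtFence rest1 = none) :
    bLoop si k rest = (before.map (fun l => l ++ "\n")
      ++ [openLine ++ ("(cp " ++ PySem.Int.toStr (si + k) ++ ")\n")]
      ++ rest1.map (fun l => l ++ "\n"), []) := by
  rw [bLoop]
  split
  · next hs => rw [h1] at hs; cases hs
  · next b f r hs =>
    rw [h1] at hs
    cases hs
    split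
    · rfl
    · next b' f' r' hs2 => rw [h2] at hs2; cases hs2

theorem bLoop_eq_pair (si k : Int) (rest before : List String) (openLine : String) (rest1 inner : List String)
    (closeLine : String) (rest2 : List String)
    (h1 : splitAtFence rest = some (before, openLine, rest1))
    (h2 : splitAtFence rest1 = some (inner, closeLine, rest2)) :
    bLoop si k rest = (before.map (fun l => l ++ "\n")
      ++ [openLine ++ ("(cp " ++ PySem.Int.toStr (si + k) ++ ")\n")]
      ++ inner.map (fun l => l ++ "\n")
      ++ [closeLine ++ ("(cp " ++ PySem.Int.toStr (si + k) ++ ")\n")]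
      ++ (bLoop si (k + 1) rest2).1,
      PySem.Str.strip (PySem.Str.join "\n" inner) :: (bLoop si (k + 1) rest2).2) := by
  rw [bLoop]
  split
  · next hs => rw [h1] at hs; cases hs
  · next b f r hs =>
    rw [h1] at hs
    cases hs
    split
    · next hs2 => rw [h2] at hs2; cases hs2
    · next b' f' r' hs2 => rw [h2] at hs2; cases hs2; rfl

theorem foldA_closed (si : Int) : ∀ (seg : List String), (∀ x ∈ seg, pvIsFence x = false) →
    ∀ (blocks : List String) (cur acc : String),
    seg.foldl (aStep si) (blocks, false, cur, acc) = (blocks, false, cur, acc ++ emitStr seg) := by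
  intro seg hseg
  induction seg with
  | nil => intro blocks cur acc; simp [emitStr]
  | cons l ls ih =>
    intro blocks cur acc
    have hl : pvIsFence l = false := hseg l (List.mem_cons_self ..)
    rw [List.foldl_cons]
    show ls.foldl (aStep si) (aStep si (blocks, false, cur, acc) l) = _
    rw [aStep]
    simp only [hl, Bool.false_eq_true, if_false]
    rw [ih (fun x hx => hseg x (List.mem_cons_of_mem _ hx))]
    simp [emitStr, String.append_assoc]

theorem foldA_open (si : Int) : ∀ (seg : List String), (∀ x ∈ seg, pvIsFence x = false) →
    ∀ (blocks : List String) (cur acc : String),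
    seg.foldl (aStep si) (blocks, true, cur, acc) = (blocks, true, cur ++ emitStr seg, acc ++ emitStr seg) := by
  intro seg hseg
  induction seg with
  | nil => intro blocks cur acc; simp [emitStr]
  | cons l ls ih =>
    intro blocks cur acc
    have hl : pvIsFence l = false := hseg l (List.mem_cons_self ..)
    rw [List.foldl_cons]
    show ls.foldl (aStep si) (aStep si (blocks, true, cur, acc) l) = _
    rw [aStep]
    simp only [hl, Bool.false_eq_true, if_false, if_true]
    rw [ih (fun x hx => hseg x (List.mem_cons_of_mem _ hx))]
    simp [emitStr, String.append_assoc]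

theorem foldA_bLoop (si : Int) : ∀ (n : Nat) (rest : List String), rest.length ≤ n →
    ∀ (blocks : List String) (acc : String),
    (rest.foldl (aStep si) (blocks, false, "", acc)).1
        = blocks ++ (bLoop si (blocks.length : Int) rest).2
    ∧ (rest.foldl (aStep si) (blocks, false, "", acc)).2.2.2
        = acc ++ catStr (bLoop si (blocks.length : Int) rest).1 := by
  intro n
  induction n with
  | zero =>
    intro rest hlen blocks acc
    have hr : rest = [] := List.eq_nil_of_length_eq_zero (Nat.le_zero.mp hlen)
    subst hr
    rw [bLoop_eq_none si _ [] rfl]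
    simp [catStr]
  | succ n ih =>
    intro rest hlen blocks acc
    cases h1 : splitAtFence rest with
    | none =>
      rw [bLoop_eq_none si _ rest h1, foldA_closed si rest (splitAtFence_none rest h1) blocks "" acc]
      simp [catStr_map_emit]
    | some t1 =>
      obtain ⟨before, openLine, rest1⟩ := t1
      obtain ⟨hre, hfo, hnb⟩ := splitAtFence_some rest before openLine rest1 h1
      subst hre
      rw [List.foldl_append, foldA_closed si before hnb blocks "" acc, List.foldl_cons]
      show ((rest1.foldl (aStep si) (aStep si (blocks, false, "", acc ++ emitStr before) openLine)).1 = _)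
        ∧ ((rest1.foldl (aStep si) (aStep si (blocks, false, "", acc ++ emitStr before) openLine)).2.2.2 = _)
      rw [aStep]
      simp only [hfo, if_true, Bool.false_eq_true, if_false]
      cases h2 : splitAtFence rest1 with
      | none =>
        rw [foldA_open si rest1 (splitAtFence_none rest1 h2)]
        rw [bLoop_eq_open si (blocks.length : Int) _ before openLine rest1 h1 h2]
        refine ⟨by simp, ?_⟩
        simp [catStr_append, catStr_map_emit, catStr, String.append_assoc]
      | some t2 =>
        obtain ⟨inner, closeLine, rest2⟩ := t2
        obtain ⟨hre1, hfc, hni⟩ := splitAtFence_some rest1 inner closeLine rest2 h2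
        subst hre1
        rw [List.foldl_append, foldA_open si inner hni, List.foldl_cons]
        rw [aStep]
        simp only [hfc, if_true]
        rw [String.empty_append, strip_emit_eq_strip_join]
        have hlen2 : rest2.length ≤ n := by
          simp [List.length_append] at hlen
          omega
        have hcast : ((blocks ++ [PySem.Str.strip (PySem.Str.join "\n" inner)]).length : Int)
            = (blocks.length : Int) + 1 := by
          simp
        have hidx : si + ((blocks ++ [PySem.Str.strip (PySem.Str.join "\n" inner)]).length : Int) - 1
            = si + (blocks.length : Int) := by
          simp
          omega
        rw [hidx]
        obtain ⟨ih1, ih2⟩ := ih rest2 hlen2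
          (blocks ++ [PySem.Str.strip (PySem.Str.join "\n" inner)]) ((acc ++ emitStr before ++ openLine
            ++ "(cp " ++ PySem.Int.toStr (si + (blocks.length : Int)) ++ ")\n") ++ emitStr inner
            ++ closeLine ++ "(cp " ++ PySem.Int.toStr (si + (blocks.length : Int)) ++ ")\n")
        rw [hcast] at ih1 ih2
        rw [bLoop_eq_pair si (blocks.length : Int) _ before openLine _ inner closeLine rest2 h1 h2]
        constructor
        · rw [ih1]; simp
        · rw [ih2]
          simp [catStr_append, catStr_map_emit, catStr, String.append_assoc]

-- ===== VERDICT (by name: the statement is the Claim_ definition above) =====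
theorem add_code_copy_tag_to_response_text_spec : Claim_equal_add_code_copy_tag_to_response_text := by
  intro response_text code_blocks_start_index _
  unfold Spec_add_code_copy_tag_to_response_text
  unfold add_code_copy_tag_to_response_text add_code_copy_tag_to_response_text_alt
  set lines := (PySem.Str.split? response_text "\n").getD [] with hl
  obtain ⟨h1, h2⟩ := foldA_bLoop code_blocks_start_index lines.length lines le_rfl [] ""
  simp only [List.length_nil, Nat.cast_zero] at h1 h2
  refine Prod.ext ?_ ?_
  · simpa [join_empty_eq_catStr] using h2
  · simpa using h1
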